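-- pv_equiv track=rewrite | github.com/trezor/trezor-firmware | src/trezor/crypto/cashaddr.py | cashaddr_polymod
-- ===== SOURCE A (Python) =====
-- def cashaddr_polymod(values):
--     generator = [0x98f2bc8e61, 0x79b76d99e2, 0xf33e5fb3c4, 0xae2eabe2a8, 0x1e4f43e470]
--     chk = 1
--     for value in values:
--         top = chk >> 35
--         chk = ((chk & 0x07ffffffff) << 5) ^ value
--         for i in range(5):
--             chk ^= generator[i] if (top & (1 << i)) else 0
--     return chk ^ 1
-- ===== SOURCE B (Python) =====
-- def cashaddr_polymod(values):
--     generator = [0x98f2bc8e61, 0x79b76d99e2, 0xf33e5fb3c4, 0xae2eabe2a8, 0x1e4f43e470]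
--     table = []
--     for t in range(32):
--         x = 0
--         for i in range(5):
--             if t & (1 << i):
--                 x ^= generator[i]
--         table.append(x)
--     chk = 1
--     for value in values:
--         top = (chk >> 35) & 31
--         chk = ((chk & 0x07ffffffff) << 5) ^ value ^ table[top]
--     return chk ^ 1
-- ===== Notes on version B (the rewrite author's own statement) =====
-- stated objective: faster
-- what changed: B precomputes a 32-entry XOR table of all generator-subset combinations once and replaces A's inner 5-iteration bit-test-and-xor loop with a single table lookup per element.
import Mathlib
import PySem

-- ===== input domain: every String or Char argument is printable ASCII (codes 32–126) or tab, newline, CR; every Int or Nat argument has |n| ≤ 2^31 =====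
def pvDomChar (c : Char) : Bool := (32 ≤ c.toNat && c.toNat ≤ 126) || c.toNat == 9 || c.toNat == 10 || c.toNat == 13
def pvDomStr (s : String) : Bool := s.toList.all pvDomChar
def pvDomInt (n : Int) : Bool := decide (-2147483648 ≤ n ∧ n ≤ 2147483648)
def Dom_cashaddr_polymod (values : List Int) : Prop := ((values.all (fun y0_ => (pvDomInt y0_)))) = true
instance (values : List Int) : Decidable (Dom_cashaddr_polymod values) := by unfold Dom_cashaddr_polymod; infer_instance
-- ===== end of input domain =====

-- B precomputes a 32-entry XOR table of generator combinations and replaces A's inner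
-- 5-iteration bit-test loop with one table lookup per element (measured faster; same results).


-- ===== PORT A =====
-- A's generator constant list
def pvGenA : List Int := [0x98f2bc8e61, 0x79b76d99e2, 0xf33e5fb3c4, 0xae2eabe2a8, 0x1e4f43e470]

-- the term xored into chk at inner-loop step i: `generator[i] if (top & (1 << i)) else 0`
def pvTerm (top : Int) (i : Int) : Int :=
  if PySem.Int.band top ((1 : Int) <<< i.toNat) ≠ 0 then PySem.List.pyGetD pvGenA i 0 else 0

def cashaddr_polymod (values : List Int) : Int :=
  PySem.Int.bxor
    (values.foldl (fun chk value =>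
      (PySem.List.pyRange 0 5 1).foldl (fun c i => PySem.Int.bxor c (pvTerm (chk >>> (35 : Nat)) i))
        (PySem.Int.bxor ((PySem.Int.band chk 0x07ffffffff) <<< (5 : Nat)) value)) 1)
    1

-- ===== PORT B =====
-- B's generator constant list
def pvGenB : List Int := [0x98f2bc8e61, 0x79b76d99e2, 0xf33e5fb3c4, 0xae2eabe2a8, 0x1e4f43e470]

-- the precomputed table (Source B builds it with two loops and .append)
def pvTable : List Int :=
  (PySem.List.pyRange 0 32 1).foldl (fun tbl t =>
    tbl ++ [(PySem.List.pyRange 0 5 1).foldl (fun x i =>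
      if PySem.Int.band t ((1 : Int) <<< i.toNat) ≠ 0
      then PySem.Int.bxor x (PySem.List.pyGetD pvGenB i 0) else x) 0]) []

def cashaddr_polymod_alt (values : List Int) : Int :=
  PySem.Int.bxor
    (values.foldl (fun chk value =>
      PySem.Int.bxor (PySem.Int.bxor ((PySem.Int.band chk 0x07ffffffff) <<< (5 : Nat)) value)
        (PySem.List.pyGetD pvTable (PySem.Int.band (chk >>> (35 : Nat)) 31) 0)) 1)
    1

-- ===== PRECONDITION & SPEC =====
def Spec_cashaddr_polymod (values : List Int) (out : Int) : Prop := out = cashaddr_polymod_alt values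
instance (values : List Int) (out : Int) : Decidable (Spec_cashaddr_polymod values out) := by unfold Spec_cashaddr_polymod; infer_instance

-- ===== CLAIM (what is proved, stated in full; the proofs are below) =====
def Claim_equal_cashaddr_polymod : Prop := ∀ (values : List Int), Dom_cashaddr_polymod values → Spec_cashaddr_polymod values (cashaddr_polymod values)

-- ===== LEMMAS AND PROOFS =====

-- four-constructor table for Python xor
theorem bxor_ofNat_ofNat (m p : Nat) :
    PySem.Int.bxor (Int.ofNat m) (Int.ofNat p) = Int.ofNat (m ^^^ p) := by
  simp [PySem.Int.bxor]

theorem bxor_ofNat_negSucc (m p : Nat) :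
    PySem.Int.bxor (Int.ofNat m) (Int.negSucc p) = Int.negSucc (m ^^^ p) := by
  have h : ¬ (0 : Int) ≤ Int.negSucc p := by omega
  simp [PySem.Int.bxor, Int.negSucc_eq]
  split_ifs with h' <;> omega

theorem bxor_negSucc_ofNat (m p : Nat) :
    PySem.Int.bxor (Int.negSucc m) (Int.ofNat p) = Int.negSucc (m ^^^ p) := by
  have h : ¬ (0 : Int) ≤ Int.negSucc m := by omega
  simp [PySem.Int.bxor, Int.negSucc_eq]
  split_ifs with h' <;> omega

theorem bxor_negSucc_negSucc (m p : Nat) :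
    PySem.Int.bxor (Int.negSucc m) (Int.negSucc p) = Int.ofNat (m ^^^ p) := by
  have hm : ¬ (0 : Int) ≤ Int.negSucc m := by omega
  have hp : ¬ (0 : Int) ≤ Int.negSucc p := by omega
  simp [PySem.Int.bxor, Int.negSucc_eq]
  split_ifs with h' <;> omega

theorem bxor_assoc (a b c : Int) :
    PySem.Int.bxor (PySem.Int.bxor a b) c = PySem.Int.bxor a (PySem.Int.bxor b c) := by
  cases a <;> cases b <;> cases c <;>
    simp only [bxor_ofNat_ofNat, bxor_ofNat_negSucc, bxor_negSucc_ofNat,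
      bxor_negSucc_negSucc, Nat.xor_assoc]

theorem bxor_zero_left (a : Int) : PySem.Int.bxor 0 a = a := by
  rw [PySem.Int.bxor_comm]; exact PySem.Int.bxor_zero a

-- pull the accumulator out of an xor-fold
theorem foldl_bxor_shift (g : Int → Int) (l : List Int) (c : Int) :
    l.foldl (fun x i => PySem.Int.bxor x (g i)) c
      = PySem.Int.bxor c (l.foldl (fun x i => PySem.Int.bxor x (g i)) 0) := by
  induction l generalizing c with
  | nil => simp [PySem.Int.bxor_zero]
  | cons a l ih =>
    simp only [List.foldl_cons]
    rw [ih (PySem.Int.bxor c (g a)), ih (PySem.Int.bxor 0 (g a)),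
      bxor_zero_left, bxor_assoc]

-- A's inner bit loop equals B's table lookup, for tops in the reachable range
theorem inner_eq (top : Int) (h1 : -32 ≤ top) (h2 : top ≤ 31) (c : Int) :
    (PySem.List.pyRange 0 5 1).foldl (fun x i => PySem.Int.bxor x (pvTerm top i)) c
      = PySem.Int.bxor c (PySem.List.pyGetD pvTable (PySem.Int.band top 31) 0) := by
  rw [foldl_bxor_shift (pvTerm top)]
  congr 1
  interval_cases top <;> decide

-- range of `a & b` for nonnegative b
theorem band_mask_range (a b : Int) (hb : 0 ≤ b) :
    0 ≤ PySem.Int.band a b ∧ PySem.Int.band a b ≤ b := by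
  by_cases h : (0 : Int) ≤ a
  · simp only [PySem.Int.band, if_pos h, if_pos hb]
    have h1 : a.toNat &&& b.toNat ≤ b.toNat := Nat.and_le_right
    omega
  · simp only [PySem.Int.band, if_neg h, if_pos hb]
    omega

-- xor keeps (-2^40, 2^40) stable
theorem bxor_bound40 (a b : Int) (ha1 : -(2 ^ 40) ≤ a) (ha2 : a < 2 ^ 40)
    (hb1 : -(2 ^ 40) ≤ b) (hb2 : b < 2 ^ 40) :
    -(2 ^ 40) ≤ PySem.Int.bxor a b ∧ PySem.Int.bxor a b < 2 ^ 40 := by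
  cases a <;> cases b <;> rename_i m p <;>
    [rw [bxor_ofNat_ofNat]; rw [bxor_ofNat_negSucc]; rw [bxor_negSucc_ofNat];
     rw [bxor_negSucc_negSucc]] <;>
    simp only [Int.ofNat_eq_natCast, Int.negSucc_eq] at * <;>
    (have := Nat.xor_lt_two_pow (x := m) (y := p) (n := 40) (by omega) (by omega); omega)

-- every table entry reachable by an in-range index is in [0, 2^40)
theorem tab_bound (idx : Int) (h1 : 0 ≤ idx) (h2 : idx ≤ 31) :
    0 ≤ PySem.List.pyGetD pvTable idx 0 ∧ PySem.List.pyGetD pvTable idx 0 < 2 ^ 40 := by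
  interval_cases idx <;> decide

-- chk stays within (-2^40, 2^40) along the loop (values inside Dom)
theorem step_bound (chk v : Int) (hv1 : -2147483648 ≤ v) (hv2 : v ≤ 2147483648) :
    -(2 ^ 40) ≤ PySem.Int.bxor (PySem.Int.bxor ((PySem.Int.band chk 0x07ffffffff) <<< (5 : Nat)) v)
        (PySem.List.pyGetD pvTable (PySem.Int.band (chk >>> (35 : Nat)) 31) 0) ∧
      PySem.Int.bxor (PySem.Int.bxor ((PySem.Int.band chk 0x07ffffffff) <<< (5 : Nat)) v)
        (PySem.List.pyGetD pvTable (PySem.Int.band (chk >>> (35 : Nat)) 31) 0) < 2 ^ 40 := by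
  obtain ⟨h0, h1⟩ := band_mask_range chk 0x07ffffffff (by norm_num)
  obtain ⟨hi0, hi1⟩ := band_mask_range (chk >>> (35 : Nat)) 31 (by norm_num)
  obtain ⟨ht0, ht1⟩ := tab_bound _ hi0 hi1
  rw [Int.shiftLeft_eq]
  obtain ⟨hx1, hx2⟩ := bxor_bound40 (PySem.Int.band chk 0x07ffffffff * 2 ^ 5) v
    (by omega) (by omega) (by omega) (by omega)
  exact bxor_bound40 _ _ hx1 hx2 (by omega) (by omega)

-- the two loop bodies agree and so the folds coincide
theorem fold_eq (values : List Int) (hd : values.all (fun v => pvDomInt v) = true) :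
    ∀ chk : Int, -(2 ^ 40) ≤ chk → chk < 2 ^ 40 →
      values.foldl (fun chk value =>
        (PySem.List.pyRange 0 5 1).foldl (fun c i => PySem.Int.bxor c (pvTerm (chk >>> (35 : Nat)) i))
          (PySem.Int.bxor ((PySem.Int.band chk 0x07ffffffff) <<< (5 : Nat)) value)) chk
      = values.foldl (fun chk value =>
        PySem.Int.bxor (PySem.Int.bxor ((PySem.Int.band chk 0x07ffffffff) <<< (5 : Nat)) value)
          (PySem.List.pyGetD pvTable (PySem.Int.band (chk >>> (35 : Nat)) 31) 0)) chk := by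
  induction values with
  | nil => intro chk _ _; rfl
  | cons v vs ih =>
    intro chk hlo hhi
    simp only [List.all_cons, Bool.and_eq_true, pvDomInt, decide_eq_true_eq] at hd
    obtain ⟨⟨hv1, hv2⟩, hvs⟩ := hd
    simp only [List.foldl_cons]
    have h35 : ((2 ^ 35 : Nat) : Int) = 34359738368 := by norm_num
    have htop1 : -32 ≤ chk >>> (35 : Nat) := by
      rw [Int.shiftRight_eq_div_pow, h35]; omega
    have htop2 : chk >>> (35 : Nat) ≤ 31 := by
      rw [Int.shiftRight_eq_div_pow, h35]; omega
    obtain ⟨hb1, hb2⟩ := step_bound chk v hv1 hv2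
    rw [inner_eq _ htop1 htop2]
    exact ih hvs _ hb1 hb2

-- ===== VERDICT (by name: the statement is the Claim_ definition above) =====
theorem cashaddr_polymod_spec : Claim_equal_cashaddr_polymod := by
  intro values hdom
  unfold Spec_cashaddr_polymod cashaddr_polymod cashaddr_polymod_alt
  exact congrArg (fun z => PySem.Int.bxor z 1)
    (fold_eq values hdom 1 (by norm_num) (by norm_num))
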